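-- pv_equiv track=rewrite | github.com/smilemilk1992/leetcodeLearn | 8、字符串操作/Z字形变换.py | convert
-- ===== SOURCE A (Python) =====
-- def convert(s: str, numRows: int) -> str:
--     result = [''] * min(numRows, len(s))
--     current_row = 0
--     go_up_down = 0
--     if len(s) <= 1 or numRows <= 1:
--         return s
--     else:
--         for i in range(len(s)):
--             result[current_row] = result[current_row] + s[i]
--             if current_row == 0: #头
--                 go_up_down = 1 #向下
--             elif current_row == numRows - 1:#尾
--                 go_up_down = -1 #向上
--             current_row = current_row + go_up_down
--     return ''.join(result)
-- ===== SOURCE B (Python) =====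
-- def convert(s: str, numRows: int) -> str:
--     if len(s) <= 1 or numRows <= 1:
--         return s
--     p = 2 * numRows - 2
--     rows = []
--     for r in range(min(numRows, len(s))):
--         row = []
--         for j in range(r, len(s), p):
--             row.append(s[j])
--             d = j + p - 2 * r
--             if 0 < r < numRows - 1 and d < len(s):
--                 row.append(s[d])
--         rows.append(''.join(row))
--     return ''.join(rows)
-- ===== Notes on version B (the rewrite author's own statement) =====
-- stated objective: alternative
-- what changed: Replaces A's single-pass bounce simulation (current_row/direction state machine appending each character into per-row buckets) with the closed-form cycle arithmetic: period p = 2*numRows-2, and each row r is built directly by stepping j = r, r+p, r+2p, ... and adding the diagonal character at j+p-2*r for interior rows, rows concatenated in order.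
import Mathlib
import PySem

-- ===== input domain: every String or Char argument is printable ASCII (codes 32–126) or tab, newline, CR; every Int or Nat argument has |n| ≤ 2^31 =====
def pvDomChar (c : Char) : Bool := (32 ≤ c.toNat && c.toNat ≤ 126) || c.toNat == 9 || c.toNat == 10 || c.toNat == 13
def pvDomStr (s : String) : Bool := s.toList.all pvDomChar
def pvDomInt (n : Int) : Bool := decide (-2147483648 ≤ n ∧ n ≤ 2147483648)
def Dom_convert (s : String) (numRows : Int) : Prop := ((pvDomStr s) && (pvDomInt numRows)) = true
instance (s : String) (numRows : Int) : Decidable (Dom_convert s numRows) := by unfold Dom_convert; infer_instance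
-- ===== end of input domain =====

-- B replaces A's stateful bounce (current_row/direction) simulation by the closed-form
-- cycle arithmetic with period p = 2*numRows-2: each row r is built directly by stepping
-- j = r, r+p, r+2p, ... plus the diagonal index j+p-2r for interior rows
-- (objective: alternative algorithm of the same cost, not claimed faster).

-- ===== PORT A =====
-- rows are kept as List Char (Python strings of one row); current_row is provably
-- always a valid nonnegative index of `result` (0 ≤ cr ≤ min(numRows,len s)-1), so
-- `result[current_row]` is ported exactly with `.toNat`, `getD` and `set`.
def convertLoop (numRows : Int) : List Char → List (List Char) → Int → Int → List (List Char)
  | [], result, _, _ => result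
  | c :: rest, result, cr, gud =>
    let result' := result.set cr.toNat (result.getD cr.toNat [] ++ [c])
    let gud' := if cr = 0 then 1 else if cr = numRows - 1 then (-1 : Int) else gud
    convertLoop numRows rest result' (cr + gud') gud'

def convert (s : String) (numRows : Int) : String :=
  let result := List.replicate (min numRows (s.toList.length : Int)).toNat ([] : List Char)
  if s.toList.length ≤ 1 ∨ numRows ≤ 1 then s
  else String.mk (convertLoop numRows s.toList result 0 0).flatten

-- ===== PORT B =====
def convert_alt (s : String) (numRows : Int) : String :=
  if s.toList.length ≤ 1 ∨ numRows ≤ 1 then s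
  else
    let cs := s.toList
    let p := 2 * numRows - 2
    String.mk ((PySem.List.pyRange 0 (min numRows (cs.length : Int)) 1).flatMap (fun r =>
      (PySem.List.pyRange r (cs.length : Int) p).flatMap (fun j =>
        PySem.List.pyGetD cs j ' ' ::
          (if 0 < r ∧ r < numRows - 1 ∧ j + p - 2 * r < (cs.length : Int)
           then [PySem.List.pyGetD cs (j + p - 2 * r) ' '] else []))))

-- ===== PRECONDITION & SPEC =====
def Spec_convert (s : String) (numRows : Int) (out : String) : Prop := out = convert_alt s numRows
instance (s : String) (numRows : Int) (out : String) : Decidable (Spec_convert s numRows out) := by unfold Spec_convert; infer_instance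

-- ===== CLAIM (what is proved, stated in full; the proofs are below) =====
def Claim_equal_convert : Prop := ∀ (s : String) (numRows : Int), Dom_convert s numRows → Spec_convert s numRows (convert s numRows)

-- ===== LEMMAS AND PROOFS =====

-- the cycle period, the row of index j, and the travelling direction after step j
def pvP (R : ℕ) : ℕ := 2 * R - 2
def pvF (R j : ℕ) : ℕ := if j % pvP R ≤ R - 1 then j % pvP R else pvP R - j % pvP R
def pvG (R j : ℕ) : Int := if j % pvP R < R - 1 then 1 else -1
def pvRow (R : ℕ) (cs : List Char) (i r : ℕ) : List Char :=
  ((List.range i).filter (fun j => pvF R j == r)).map (fun j => cs.getD j ' ')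
def pvRows (R : ℕ) (cs : List Char) (m i : ℕ) : List (List Char) :=
  (List.range m).map (fun r => pvRow R cs i r)

theorem mod_succ_eq (P i : ℕ) (hP : 2 ≤ P) :
    (i + 1) % P = if i % P = P - 1 then 0 else i % P + 1 := by
  have h1 : i % P < P := Nat.mod_lt _ (by omega)
  conv_lhs => rw [Nat.add_mod]
  rw [Nat.mod_eq_of_lt (show 1 < P by omega)]
  by_cases hk : i % P = P - 1
  · rw [hk, if_pos rfl, show P - 1 + 1 = P by omega, Nat.mod_self]
  · rw [if_neg hk, Nat.mod_eq_of_lt (by omega)]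

theorem pvF_le (R j : ℕ) (hR : 2 ≤ R) : pvF R j ≤ R - 1 ∧ pvF R j ≤ j := by
  have hP : 2 ≤ pvP R := by unfold pvP; omega
  have h1 : j % pvP R < pvP R := Nat.mod_lt _ (by omega)
  have h2 : j % pvP R ≤ j := Nat.mod_le _ _
  unfold pvF
  unfold pvP at *
  split <;> omega

theorem pvF_succ (R j : ℕ) (hR : 2 ≤ R) : (pvF R (j + 1) : Int) = pvF R j + pvG R j := by
  have hP : 2 ≤ pvP R := by unfold pvP; omega
  have h1 : j % pvP R < pvP R := Nat.mod_lt _ (by omega)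
  have hs := mod_succ_eq (pvP R) j hP
  unfold pvF pvG
  rw [hs]
  unfold pvP at *
  split_ifs <;> push_cast <;> omega

theorem pvG_update (R j : ℕ) (hR : 2 ≤ R) :
    (if (pvF R j : Int) = 0 then 1 else if (pvF R j : Int) = (R : Int) - 1 then (-1 : Int)
      else (if j = 0 then 0 else pvG R (j - 1))) = pvG R j := by
  have hP : 2 ≤ pvP R := by unfold pvP; omega
  have h1 : j % pvP R < pvP R := Nat.mod_lt _ (by omega)
  rcases Nat.eq_zero_or_pos j with hj | hj
  · subst hj
    simp [pvF, pvG, Nat.zero_mod]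
    unfold pvP at *; omega
  · have hjj : j - 1 + 1 = j := by omega
    have hs := mod_succ_eq (pvP R) (j - 1) hP
    rw [hjj] at hs
    have h2 : (j - 1) % pvP R < pvP R := Nat.mod_lt _ (by omega)
    unfold pvF pvG
    simp only [if_neg (by omega : ¬ j = 0)]
    split_ifs at * <;> push_cast at * <;> omega

theorem pvRows_getD (R : ℕ) (cs : List Char) (m i r : ℕ) (hr : r < m) :
    (pvRows R cs m i).getD r [] = pvRow R cs i r := by
  unfold pvRows
  rw [List.getD_eq_getElem _ _ (by simpa using hr)]
  simp

theorem pvRow_succ (R : ℕ) (cs : List Char) (i r : ℕ) :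
    pvRow R cs (i + 1) r =
      pvRow R cs i r ++ (if pvF R i = r then [cs.getD i ' '] else []) := by
  unfold pvRow
  rw [List.range_succ, List.filter_append, List.map_append]
  congr 1
  by_cases h : pvF R i = r <;> simp [h]

theorem pvRows_set (R : ℕ) (cs : List Char) (m i : ℕ) (_hfi : pvF R i < m) :
    (pvRows R cs m i).set (pvF R i) (pvRow R cs i (pvF R i) ++ [cs.getD i ' '])
      = pvRows R cs m (i + 1) := by
  apply List.ext_getElem
  · simp [pvRows]
  · intro k h1 h2
    have hk : k < m := by simpa [pvRows] using h2
    rw [List.getElem_set]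
    by_cases hkf : pvF R i = k
    · subst hkf
      simp [pvRows, pvRow_succ]
    · rw [if_neg hkf]
      simp [pvRows, pvRow_succ, hkf]

theorem convertLoop_spec (R : ℕ) (hR : 2 ≤ R) (cs : List Char) (m : ℕ)
    (hm : m = min R cs.length) :
    ∀ rest i, rest = cs.drop i → i ≤ cs.length →
      convertLoop (R : Int) rest (pvRows R cs m i) (pvF R i : Int)
          (if i = 0 then 0 else pvG R (i - 1))
        = pvRows R cs m cs.length := by
  intro rest
  induction rest with
  | nil =>
    intro i hdrop hle
    have hi : i = cs.length := by
      have := congrArg List.length hdrop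
      simp [List.length_drop] at this
      omega
    subst hi
    simp [convertLoop]
  | cons c rest' ih =>
    intro i hdrop hle
    have hilt : i < cs.length := by
      by_contra h
      rw [List.drop_eq_nil_of_le (by omega)] at hdrop
      simp at hdrop
    have hc : cs.getD i ' ' = c := by
      have h0 : (cs.drop i)[0]? = some c := by rw [← hdrop]; rfl
      rw [List.getElem?_drop] at h0
      have h0' : cs[i]? = some c := by simpa using h0
      rw [List.getD_eq_getElem?_getD, h0']
      rfl
    have hrest : rest' = cs.drop (i + 1) := by
      have h1 : (cs.drop i).drop 1 = rest' := by rw [← hdrop]; rfl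
      rw [List.drop_drop] at h1
      rw [← h1]
    have hFi_lt : pvF R i < m := by
      obtain ⟨h1, h2⟩ := pvF_le R i hR
      omega
    have step := ih (i + 1) hrest (by omega)
    simp only [if_neg (Nat.succ_ne_zero i), Nat.add_sub_cancel] at step
    simp only [convertLoop, Int.toNat_natCast]
    rw [pvRows_getD R cs m i (pvF R i) hFi_lt, ← hc,
        pvRows_set R cs m i hFi_lt, pvG_update R i hR, ← pvF_succ R i hR]
    exact step

-- initial state: all rows empty
theorem pvRows_zero (R : ℕ) (cs : List Char) (m : ℕ) :
    pvRows R cs m 0 = List.replicate m [] := by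
  simp [pvRows, pvRow]

theorem pvF_zero (R : ℕ) (hR : 2 ≤ R) : pvF R 0 = 0 := by
  have hP : 2 ≤ pvP R := by unfold pvP; omega
  simp [pvF, Nat.zero_mod]

-- closed-form characterisation of the row of index j (the heart of B)
theorem pvF_char (R j r : ℕ) (hR : 2 ≤ R) (hr : r < R) :
    pvF R j = r ↔ (j % pvP R = r ∨ j % pvP R = pvP R - r) := by
  have hP : 2 ≤ pvP R := by unfold pvP; omega
  have h1 : j % pvP R < pvP R := Nat.mod_lt _ (by omega)
  unfold pvF
  unfold pvP at *
  split <;> omega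

-- two strictly increasing Int lists with the same members are equal
theorem sorted_mem_ext : ∀ {l₁ l₂ : List Int}, l₁.Pairwise (· < ·) → l₂.Pairwise (· < ·) →
    (∀ x, x ∈ l₁ ↔ x ∈ l₂) → l₁ = l₂ := by
  intro l₁
  induction l₁ with
  | nil =>
    intro l₂ _ _ hmem
    cases l₂ with
    | nil => rfl
    | cons b u => exact absurd ((hmem b).mpr (List.mem_cons_self)) (List.not_mem_nil)
  | cons a t ih =>
    intro l₂ h₁ h₂ hmem
    cases l₂ with
    | nil => exact absurd ((hmem a).mp (List.mem_cons_self)) (List.not_mem_nil)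
    | cons b u =>
      have hab : a = b := by
        rcases List.mem_cons.mp ((hmem a).mp List.mem_cons_self) with h | h
        · exact h
        · rcases List.mem_cons.mp ((hmem b).mpr List.mem_cons_self) with h' | h'
          · exact h'.symm
          · have hba : b < a := (List.pairwise_cons.mp h₂).1 a h
            have hab : a < b := (List.pairwise_cons.mp h₁).1 b h'
            omega
      subst hab
      have htu : ∀ x, x ∈ t ↔ x ∈ u := by
        intro x
        constructor
        · intro hx
          have hax : a < x := (List.pairwise_cons.mp h₁).1 x hx
          rcases List.mem_cons.mp ((hmem x).mp (List.mem_cons_of_mem a hx)) with h | h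
          · omega
          · exact h
        · intro hx
          have hax : a < x := (List.pairwise_cons.mp h₂).1 x hx
          rcases List.mem_cons.mp ((hmem x).mpr (List.mem_cons_of_mem a hx)) with h | h
          · omega
          · exact h
      rw [ih (List.pairwise_cons.mp h₁).2 (List.pairwise_cons.mp h₂).2 htu]

theorem natmod_iff (P r j : ℕ) (hr : r < P) : j % P = r ↔ ∃ k, j = r + P * k := by
  constructor
  · intro h
    refine ⟨j / P, ?_⟩
    rw [← h]
    exact (Nat.mod_add_div j P).symm
  · rintro ⟨k, rfl⟩
    rw [Nat.add_mul_mod_self_left]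
    exact Nat.mod_eq_of_lt hr

theorem idx_eq (R r n : ℕ) (hR : 2 ≤ R) (hr : r < R) :
    ((PySem.List.pyRange (r : Int) (n : Int) (2 * (R : Int) - 2)).flatMap
        (fun j => j :: (if 0 < (r : Int) ∧ (r : Int) < (R : Int) - 1 ∧
              j + (2 * (R : Int) - 2) - 2 * (r : Int) < (n : Int)
            then [j + (2 * (R : Int) - 2) - 2 * (r : Int)] else [])))
      = List.map (fun j : ℕ => (j : Int)) ((List.range n).filter (fun j => pvF R j == r)) := by
  have hR2 : (2 : Int) ≤ (R : Int) := by exact_mod_cast hR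
  have hp : (0 : Int) < 2 * (R : Int) - 2 := by omega
  have hPel : ((pvP R : ℕ) : Int) = 2 * (R : Int) - 2 := by unfold pvP; omega
  have hrP : r < pvP R := by unfold pvP; omega
  apply sorted_mem_ext
  · -- strict sortedness of the stepped index list
    rw [List.flatMap_def, List.pairwise_flatten]
    constructor
    · intro l hl
      obtain ⟨a, _, rfl⟩ := List.mem_map.mp hl
      split_ifs with hc
      · exact List.pairwise_pair.mpr (by omega)
      · simp
    · rw [PySem.List.pyRange_of_pos _ _ hp, List.map_map, List.pairwise_map]
      apply List.Pairwise.imp ?_ List.pairwise_lt_range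
      intro k k' hkk x hx y hy
      have h1 : (1 : Int) ≤ (k' : Int) - (k : Int) := by
        have := hkk
        omega
      have hmul : 2 * (R : Int) - 2 ≤ (2 * (R : Int) - 2) * ((k' : Int) - (k : Int)) :=
        le_mul_of_one_le_right hp.le h1
      have hdist : (2 * (R : Int) - 2) * ((k' : Int) - (k : Int))
          = (2 * (R : Int) - 2) * (k' : Int) - (2 * (R : Int) - 2) * (k : Int) := by ring
      rw [hdist] at hmul
      simp only [Function.comp] at hx hy
      generalize hA : (2 * (R : Int) - 2) * (k : Int) = A at hx hmul
      generalize hA' : (2 * (R : Int) - 2) * (k' : Int) = A' at hy hmul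
      split_ifs at hx hy with hc hc' <;>
        simp only [List.mem_cons, List.mem_singleton, List.not_mem_nil, or_false] at hx hy <;>
        rcases hx with rfl | rfl <;> first
          | (rcases hy with rfl | rfl <;> omega)
          | omega
  · -- strict sortedness of the filtered index list
    rw [List.pairwise_map]
    apply List.Pairwise.imp ?_ (List.Pairwise.filter _ List.pairwise_lt_range)
    intro a b h
    exact_mod_cast h
  · -- same members
    intro x
    simp only [List.mem_flatMap, PySem.List.mem_pyRange_iff_of_pos hp, List.mem_map,
      List.mem_filter, List.mem_range, List.mem_cons, beq_iff_eq]
    constructor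
    · rintro ⟨a, ⟨har, han, k, hk⟩, hmem⟩
      have hk0 : 0 ≤ k := by
        by_contra hneg
        push_neg at hneg
        have : (2 * (R : Int) - 2) * k < 0 :=
          mul_neg_of_pos_of_neg hp hneg
        omega
      have ha : a = (r : Int) + (2 * (R : Int) - 2) * k := by omega
      have hcast : ((r + pvP R * k.toNat : ℕ) : Int) = a := by
        push_cast
        rw [hPel, Int.toNat_of_nonneg hk0]
        omega
      rcases hmem with rfl | hmem
      · refine ⟨r + pvP R * k.toNat, ⟨?_, ?_⟩, hcast⟩
        · have := hcast
          omega
        · rw [pvF_char R _ r hR hr]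
          exact Or.inl ((natmod_iff (pvP R) r _ hrP).mpr ⟨k.toNat, rfl⟩)
      · split_ifs at hmem with hc
        · simp only [List.mem_singleton] at hmem
          subst hmem
          obtain ⟨hr0, hrR, hdn⟩ := hc
          have hrpos : 0 < r := by exact_mod_cast hr0
          have hPr : pvP R - r < pvP R := by unfold pvP at *; omega
          have hcast2 : (((pvP R - r) + pvP R * k.toNat : ℕ) : Int)
              = a + (2 * (R : Int) - 2) - 2 * (r : Int) := by
            push_cast [Nat.cast_sub (le_of_lt hrP)]
            rw [hPel, Int.toNat_of_nonneg hk0]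
            omega
          refine ⟨(pvP R - r) + pvP R * k.toNat, ⟨?_, ?_⟩, hcast2⟩
          · have := hcast2
            omega
          · rw [pvF_char R _ r hR hr]
            refine Or.inr ?_
            exact (natmod_iff (pvP R) (pvP R - r) _ hPr).mpr ⟨k.toNat, rfl⟩
        · simp at hmem
    · rintro ⟨j, ⟨hjn, hpv⟩, rfl⟩
      rw [pvF_char R j r hR hr] at hpv
      have hsplit : (∃ k, j = r + pvP R * k) ∨
          (0 < r ∧ r < R - 1 ∧ ∃ k, j = (pvP R - r) + pvP R * k) := by
        rcases hpv with h | h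
        · exact Or.inl ((natmod_iff (pvP R) r j hrP).mp h)
        · have hjP : j % pvP R < pvP R := Nat.mod_lt _ (by unfold pvP; omega)
          by_cases hr0 : r = 0
          · subst hr0
            exfalso
            unfold pvP at *
            omega
          · by_cases hrR : r = R - 1
            · have : pvP R - r = r := by unfold pvP at *; omega
              rw [this] at h
              exact Or.inl ((natmod_iff (pvP R) r j hrP).mp h)
            · have hPr : pvP R - r < pvP R := by unfold pvP at *; omega
              exact Or.inr ⟨by omega, by omega,
                (natmod_iff (pvP R) (pvP R - r) j hPr).mp h⟩
      rcases hsplit with ⟨k, rfl⟩ | ⟨hr0, hrR, k, rfl⟩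
      · refine ⟨((r + pvP R * k : ℕ) : Int), ⟨?_, ?_, ⟨(k : Int), ?_⟩⟩, Or.inl rfl⟩
        · push_cast
          omega
        · exact_mod_cast hjn
        · push_cast
          rw [hPel]
          ring_nf
          try omega
      · have hcond : 0 < (r : Int) ∧ (r : Int) < (R : Int) - 1 ∧
            (((pvP R - r) + pvP R * k : ℕ) : Int) < (n : Int) := by
          refine ⟨by exact_mod_cast hr0, by push_cast; omega, by exact_mod_cast hjn⟩
        refine ⟨((r : ℕ) : Int) + (2 * (R : Int) - 2) * (k : Int), ⟨?_, ?_, ⟨(k : Int), by ring⟩⟩, Or.inr ?_⟩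
        · have : (0 : Int) ≤ (2 * (R : Int) - 2) * (k : Int) :=
            mul_nonneg hp.le (by positivity)
          omega
        · have hcast3 : (((pvP R - r) + pvP R * k : ℕ) : Int)
              = (r : Int) + (2 * (R : Int) - 2) * (k : Int) + (2 * (R : Int) - 2) - 2 * (r : Int) := by
            push_cast [Nat.cast_sub (le_of_lt hrP)]
            rw [hPel]
            ring_nf
            try omega
          have hlt : (((pvP R - r) + pvP R * k : ℕ) : Int) < (n : Int) := by exact_mod_cast hjn
          omega
        · rw [if_pos ?_]
          · simp only [List.mem_singleton]
            push_cast [Nat.cast_sub (le_of_lt hrP)]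
            rw [hPel]
            ring_nf
            try omega
          · have hcast3 : (((pvP R - r) + pvP R * k : ℕ) : Int)
                = (r : Int) + (2 * (R : Int) - 2) * (k : Int) + (2 * (R : Int) - 2) - 2 * (r : Int) := by
              push_cast [Nat.cast_sub (le_of_lt hrP)]
              rw [hPel]
              ring_nf
              try omega
            have hlt : (((pvP R - r) + pvP R * k : ℕ) : Int) < (n : Int) := by exact_mod_cast hjn
            exact ⟨hcond.1, hcond.2.1, by omega⟩

-- B's body computes the flatten of the closed-form rows
theorem alt_rows (R m n : ℕ) (cs : List Char) (hR : 2 ≤ R) (hmR : m ≤ R) (hcs : cs.length = n) :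
    ((PySem.List.pyRange 0 (m : Int) 1).flatMap (fun r =>
      (PySem.List.pyRange r (cs.length : Int) (2 * (R : Int) - 2)).flatMap (fun j =>
        PySem.List.pyGetD cs j ' ' ::
          (if 0 < r ∧ r < (R : Int) - 1 ∧ j + (2 * (R : Int) - 2) - 2 * r < (cs.length : Int)
           then [PySem.List.pyGetD cs (j + (2 * (R : Int) - 2) - 2 * r) ' '] else []))))
      = ((List.range m).map (fun r => pvRow R cs n r)).flatten := by
  have hrange : PySem.List.pyRange 0 ((m : ℕ) : Int) 1
      = List.map (fun k : ℕ => (k : Int)) (List.range m) := by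
    rw [PySem.List.pyRange_one]
    simp
  rw [hrange, hcs, List.flatMap_def, List.map_map]
  congr 1
  apply List.map_congr_left
  intro r hrmem
  have hr : r < R := lt_of_lt_of_le (List.mem_range.mp hrmem) hmR
  simp only [Function.comp]
  have hblk : (fun j : Int => PySem.List.pyGetD cs j ' ' ::
        (if 0 < (r : Int) ∧ (r : Int) < (R : Int) - 1 ∧
            j + (2 * (R : Int) - 2) - 2 * (r : Int) < (n : Int)
         then [PySem.List.pyGetD cs (j + (2 * (R : Int) - 2) - 2 * (r : Int)) ' '] else []))
      = fun j : Int => List.map (fun i => PySem.List.pyGetD cs i ' ')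
          (j :: (if 0 < (r : Int) ∧ (r : Int) < (R : Int) - 1 ∧
              j + (2 * (R : Int) - 2) - 2 * (r : Int) < (n : Int)
            then [j + (2 * (R : Int) - 2) - 2 * (r : Int)] else [])) := by
    funext j
    rw [List.map_cons, apply_ite (List.map (fun i => PySem.List.pyGetD cs i ' '))]
    simp
  rw [hblk, ← List.map_flatMap, idx_eq R r n hR hr, List.map_map]
  unfold pvRow
  apply List.map_congr_left
  intro j _
  simp [Function.comp]

-- ===== VERDICT (by name: the statement is the Claim_ definition above) =====
theorem convert_spec : Claim_equal_convert := by
  unfold Claim_equal_convert Spec_convert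
  intro s numRows _
  simp only [convert, convert_alt]
  by_cases hdeg : s.toList.length ≤ 1 ∨ numRows ≤ 1
  · rw [if_pos hdeg, if_pos hdeg]
  · rw [if_neg hdeg, if_neg hdeg]
    push_neg at hdeg
    obtain ⟨hlen, hnum⟩ := hdeg
    set cs := s.toList with hcs
    set n := cs.length with hn
    set R := numRows.toNat with hRdef
    have hcast : (R : Int) = numRows := Int.toNat_of_nonneg (by omega)
    have hR : 2 ≤ R := by omega
    have hn2 : 2 ≤ n := by omega
    set m := min R n with hm
    rw [← hcast]
    have hmin : (min ((R : ℕ) : Int) ((n : ℕ) : Int)).toNat = m := by omega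
    have hminI : min ((R : ℕ) : Int) ((n : ℕ) : Int) = ((m : ℕ) : Int) := by omega
    rw [hmin, hminI]
    congr 1
    have hA : convertLoop (R : Int) cs (List.replicate m []) 0 0 = pvRows R cs m n := by
      have h := convertLoop_spec R hR cs m hm cs 0 (by simp) (by omega)
      rw [pvRows_zero, pvF_zero R hR, if_pos rfl] at h
      simpa using h
    rw [hA, alt_rows R m n cs hR (by omega) rfl]
    unfold pvRows
    rfl
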